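-- pv_equiv track=rewrite | github.com/thilankadw/Agentic_Memory_Design_Week-07_08_AEE_Bootcamp-Zuu_Crew- | src/services/crm_service/llm_data_generator.py | _fallback_reasons
-- ===== SOURCE A (Python) =====
-- from typing import List, Dict
--
-- def _fallback_reasons(n: int, specialty: str) -> List[str]:
--     """Fallback appointment reasons if LLM fails."""
--     reasons = [
--         f"Routine {specialty.lower()} consultation",
--         f"{specialty} follow-up visit",
--         f"Annual {specialty.lower()} checkup",
--         "Diagnostic consultation",
--         "Treatment review",
--     ]
--     return [reasons[i % len(reasons)] for i in range(n)]
-- ===== SOURCE B (Python) =====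
-- from typing import List
--
-- def _fallback_reasons(n: int, specialty: str) -> List[str]:
--     """Fallback appointment reasons if LLM fails."""
--     reasons = [
--         f"Routine {specialty.lower()} consultation",
--         f"{specialty} follow-up visit",
--         f"Annual {specialty.lower()} checkup",
--         "Diagnostic consultation",
--         "Treatment review",
--     ]
--     q, r = divmod(max(n, 0), len(reasons))
--     return reasons * q + reasons[:r]
-- ===== Notes on version B (the rewrite author's own statement) =====
-- stated objective: alternative
-- what changed: Replaces the per-index i % len comprehension with whole-block replication: q, r = divmod(max(n,0), len(reasons)); return reasons * q + reasons[:r].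
import Mathlib
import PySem

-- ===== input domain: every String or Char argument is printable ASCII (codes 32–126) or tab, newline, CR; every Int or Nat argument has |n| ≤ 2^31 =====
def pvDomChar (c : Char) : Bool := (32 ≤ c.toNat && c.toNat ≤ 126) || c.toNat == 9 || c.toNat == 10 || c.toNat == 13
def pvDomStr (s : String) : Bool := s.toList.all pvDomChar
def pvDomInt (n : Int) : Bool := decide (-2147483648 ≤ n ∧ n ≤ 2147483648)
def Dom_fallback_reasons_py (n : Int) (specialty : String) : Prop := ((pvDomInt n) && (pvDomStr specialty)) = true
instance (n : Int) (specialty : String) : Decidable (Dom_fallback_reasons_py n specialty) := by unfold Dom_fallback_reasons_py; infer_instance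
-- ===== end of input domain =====

-- B replaces A's per-index `i % len` comprehension by whole-block replication plus a
-- partial slice (divmod decomposition); same values, same cost (objective: alternative).

-- The five template strings, built exactly as both Pythons build them
-- f-string = concatenation of literal parts, ported as PySem.Str.join (kernel-reducible; exact)
def pvReasons (specialty : String) : List String :=
  [PySem.Str.join "" ["Routine ", PySem.Str.lower specialty, " consultation"],
   PySem.Str.join "" [specialty, " follow-up visit"],
   PySem.Str.join "" ["Annual ", PySem.Str.lower specialty, " checkup"],
   "Diagnostic consultation",
   "Treatment review"]

-- ===== PORT A =====
-- return [reasons[i % len(reasons)] for i in range(n)]   (index always in range: pyGetD exact)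
def fallback_reasons_py (n : Int) (specialty : String) : List String :=
  let reasons := pvReasons specialty
  (PySem.List.pyRange 0 n 1).map
    (fun i => PySem.List.pyGetD reasons (PySem.Int.mod i (PySem.List.len reasons)) "")

-- ===== PORT B =====
-- q, r = divmod(max(n, 0), len(reasons)); return reasons * q + reasons[:r]
def fallback_reasons_py_alt (n : Int) (specialty : String) : List String :=
  let reasons := pvReasons specialty
  let q := PySem.Int.floordiv (max n 0) (PySem.List.len reasons)
  let r := PySem.Int.mod (max n 0) (PySem.List.len reasons)
  PySem.List.pyRepeat reasons q ++ PySem.List.slice reasons none (some r)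

-- ===== PRECONDITION & SPEC =====
def Spec_fallback_reasons_py (n : Int) (specialty : String) (out : List String) : Prop := out = fallback_reasons_py_alt n specialty
instance (n : Int) (specialty : String) (out : List String) : Decidable (Spec_fallback_reasons_py n specialty out) := by unfold Spec_fallback_reasons_py; infer_instance

-- ===== CLAIM (what is proved, stated in full; the proofs are below) =====
def Claim_equal_fallback_reasons_py : Prop := ∀ (n : Int) (specialty : String), Dom_fallback_reasons_py n specialty → Spec_fallback_reasons_py n specialty (fallback_reasons_py n specialty)

-- ===== LEMMAS AND PROOFS =====

-- Core fact on the Nat side: cycling through a 5-element list m times is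
-- (m / 5) full copies followed by the first (m % 5) elements.
theorem pv_cycle_eq (l : List String) (hl : l.length = 5) (m : Nat) :
    (List.range m).map (fun k => l.getD (k % 5) "") =
      (List.replicate (m / 5) l).flatten ++ l.take (m % 5) := by
  induction m with
  | zero => simp
  | succ m ih =>
      rw [List.range_succ, List.map_append, ih, List.map_singleton]
      have hr : m % 5 < l.length := by omega
      have hstep : l.take (m % 5) ++ [l.getD (m % 5) ""] = l.take (m % 5 + 1) := by
        rw [List.getD_eq_getElem l "" hr, List.take_succ_eq_append_getElem hr]
      rw [List.append_assoc, hstep]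
      by_cases hc : m % 5 = 4
      · have h1 : (m + 1) / 5 = m / 5 + 1 := by omega
        have h2 : (m + 1) % 5 = 0 := by omega
        have hfull : l.take (m % 5 + 1) = l := by
          rw [hc]; exact List.take_of_length_le (by omega)
        rw [h1, h2, hfull, List.replicate_succ', List.flatten_append]
        simp
      · have h1 : (m + 1) / 5 = m / 5 := by omega
        have h2 : (m + 1) % 5 = m % 5 + 1 := by omega
        rw [h1, h2]

theorem pv_main (l : List String) (hl : l.length = 5) (n : Int) :
    (PySem.List.pyRange 0 n 1).map
        (fun i => PySem.List.pyGetD l (PySem.Int.mod i (PySem.List.len l)) "") =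
      PySem.List.pyRepeat l (PySem.Int.floordiv (max n 0) (PySem.List.len l)) ++
        PySem.List.slice l none (some (PySem.Int.mod (max n 0) (PySem.List.len l))) := by
  have hlen : PySem.List.len l = ((5 : Nat) : Int) := by simp [PySem.List.len, hl]
  have hmax : max n 0 = ((n.toNat : Nat) : Int) := by omega
  have hrange : PySem.List.pyRange 0 n 1 = (List.range n.toNat).map (fun k => ((k : Nat) : Int)) := by
    rw [PySem.List.pyRange_one]; simp
  rw [hlen, hmax, hrange, PySem.Int.floordiv_natCast, PySem.Int.mod_natCast,
    PySem.List.slice_to_natCast, List.map_map]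
  have hmap : ((fun i => PySem.List.pyGetD l (PySem.Int.mod i ((5:Nat):Int)) "") ∘ fun k : Nat => ((k:Nat):Int))
      = fun k : Nat => l.getD (k % 5) "" := by
    funext k
    simp only [Function.comp_apply, PySem.Int.mod_natCast, PySem.List.pyGetD_natCast]
  rw [hmap, pv_cycle_eq l hl]
  congr 1

-- ===== VERDICT (by name: the statement is the Claim_ definition above) =====
theorem fallback_reasons_py_spec : Claim_equal_fallback_reasons_py := by
  intro n specialty _
  unfold Spec_fallback_reasons_py fallback_reasons_py fallback_reasons_py_alt
  exact pv_main (pvReasons specialty) rfl n
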